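-- pv_equiv track=rewrite | github.com/gcp825/advent_of_code | 2023/python/01.py | insert_numbers
-- ===== SOURCE A (Python) =====
-- def insert_numbers(document):
--
--     numbers = ['zero', 'one', 'two', 'three', 'four', 'five', 'six', 'seven', 'eight', 'nine']
--     updated_doc = []
--
--     for item in document:
--         line = item
--         for i in range(len(line)-1,-1,-1):
--             for n, nbr in enumerate(numbers):
--                 if line[i:i+len(nbr)] == nbr:
--                     line = line[:i+len(nbr)] + str(n) + line[i+len(nbr):]
--                     break
--         updated_doc += [line]
--
--     return updated_doc
-- ===== SOURCE B (Python) =====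
-- def insert_numbers(document):
--
--     numbers = ['zero', 'one', 'two', 'three', 'four', 'five', 'six', 'seven', 'eight', 'nine']
--     result = []
--
--     for item in document:
--         out = []
--         for i in range(len(item)):
--             out.append(item[i])
--             for n, nbr in enumerate(numbers):
--                 start = i - len(nbr) + 1
--                 if start >= 0 and item[start:i+1] == nbr:
--                     out.append(str(n))
--         result.append(''.join(out))
--
--     return result
-- ===== Notes on version B (the rewrite author's own statement) =====
-- stated objective: alternative
-- what changed: B builds each output line in one left-to-right pass over the original string, appending a digit whenever a number word ends at the current index, instead of A's reverse-iteration with repeated in-place string splicing.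
import Mathlib
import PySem

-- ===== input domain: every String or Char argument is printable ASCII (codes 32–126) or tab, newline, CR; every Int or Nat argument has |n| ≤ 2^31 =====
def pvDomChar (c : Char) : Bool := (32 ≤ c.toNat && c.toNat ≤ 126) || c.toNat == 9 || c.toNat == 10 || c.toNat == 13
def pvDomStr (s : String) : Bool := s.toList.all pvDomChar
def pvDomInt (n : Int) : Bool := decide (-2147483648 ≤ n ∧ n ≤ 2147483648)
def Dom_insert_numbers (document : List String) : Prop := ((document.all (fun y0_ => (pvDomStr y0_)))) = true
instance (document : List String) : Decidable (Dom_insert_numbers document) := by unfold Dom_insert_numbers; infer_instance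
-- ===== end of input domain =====

set_option maxRecDepth 20000

-- B rebuilds each line in a single forward pass (digit appended where a word ends) instead of A's
-- reverse-index in-place splicing; equal return values are proved for all inputs (no mutation either side).

-- ===== PORT A =====
def numbersA : List (List Char) :=
  ["zero".toList, "one".toList, "two".toList, "three".toList, "four".toList,
   "five".toList, "six".toList, "seven".toList, "eight".toList, "nine".toList]

-- 'for n, nbr in enumerate(numbers): if line[i:i+len(nbr)] == nbr: line = splice; break'
def tryA : List (Int × List Char) → List Char → Int → List Char
  | [], line, _ => line
  | (n, nbr) :: rest, line, i =>
      if PySem.List.slice line (some i) (some (i + (nbr.length : Int))) = nbr then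
        PySem.List.slice line none (some (i + (nbr.length : Int))) ++ PySem.Int.toChars n
          ++ PySem.List.slice line (some (i + (nbr.length : Int))) none
      else tryA rest line i

-- 'for i in range(len(line)-1, -1, -1): …' mutating line
def lineA (item : List Char) : List Char :=
  (PySem.List.pyRange ((item.length : Int) - 1) (-1) (-1)).foldl
    (fun line i => tryA (PySem.List.enumerate numbersA 0) line i) item

def insert_numbers (document : List String) : List String :=
  document.foldl (fun acc item => acc ++ [String.ofList (lineA item.toList)]) []

-- ===== PORT B =====
def numbersB : List (List Char) :=
  ["zero".toList, "one".toList, "two".toList, "three".toList, "four".toList,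
   "five".toList, "six".toList, "seven".toList, "eight".toList, "nine".toList]

-- single forward pass: emit item[i], then the digit of any word that ends exactly at i
def lineB (item : List Char) : List Char :=
  (PySem.List.pyRange 0 (item.length : Int) 1).foldl
    (fun out i =>
      (PySem.List.enumerate numbersB 0).foldl
        (fun out p =>
          if i - (p.2.length : Int) + 1 ≥ 0 ∧
             PySem.List.slice item (some (i - (p.2.length : Int) + 1)) (some (i + 1)) = p.2 then
            out ++ PySem.Int.toChars p.1
          else out)
        (out ++ (PySem.List.pyGet? item i).toList))
    []

def insert_numbers_alt (document : List String) : List String :=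
  document.foldl (fun acc item => acc ++ [String.ofList (lineB item.toList)]) []

-- ===== PRECONDITION & SPEC =====
def Spec_insert_numbers (document : List String) (out : List String) : Prop := out = insert_numbers_alt document
instance (document : List String) (out : List String) : Decidable (Spec_insert_numbers document out) := by unfold Spec_insert_numbers; infer_instance

-- ===== CLAIM (what is proved, stated in full; the proofs are below) =====
def Claim_equal_insert_numbers : Prop := ∀ (document : List String), Dom_insert_numbers document → Spec_insert_numbers document (insert_numbers document)

-- ===== LEMMAS AND PROOFS =====

-- the enumerated word list both ports iterate over
def wordsE : List (Int × List Char) := PySem.List.enumerate numbersB 0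

-- digits emitted at end-index i, for words whose start index is ≥ slo
def gEmit (l : List Char) (slo i : Nat) : List Char :=
  wordsE.flatMap (fun p =>
    if p.2.length ≤ i + 1 ∧ slo + p.2.length ≤ i + 1 ∧
       (l.drop (i + 1 - p.2.length)).take p.2.length = p.2 then PySem.Int.toChars p.1 else [])

-- B's output from position lo on, with start bound slo
def Egen (l : List Char) (slo lo : Nat) : List Char :=
  (List.range' lo (l.length - lo)).flatMap (fun i => l.getD i ' ' :: gEmit l slo i)

-- ===== decidable facts about the ten words =====
theorem F_len : ∀ p ∈ wordsE, 3 ≤ p.2.length ∧ p.2.length ≤ 5 := by decide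
theorem F_nodup : wordsE.Nodup := by decide
-- no word occurs inside another at a positive offset (in particular no word is a proper suffix)
theorem F_innerN : ∀ p ∈ wordsE, ∀ q ∈ wordsE, ∀ d < 3, 1 ≤ d → d + q.2.length ≤ p.2.length →
    ((p.2.drop d).take q.2.length).map Char.toNat ≠ q.2.map Char.toNat := by decide
-- no word is a prefix of another
theorem F_prefixN : ∀ p ∈ wordsE, ∀ q ∈ wordsE,
    (q.2.take p.2.length).map Char.toNat = p.2.map Char.toNat →
    p.1 = q.1 ∧ p.2.map Char.toNat = q.2.map Char.toNat := by decide
-- the emitted digit characters, and that word characters are not digits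
theorem F_dig1 : ∀ q ∈ wordsE, ∀ m ∈ (PySem.Int.toChars q.1).map Char.toNat,
    48 ≤ m ∧ m ≤ 57 := by decide
theorem F_dig2 : ∀ p ∈ wordsE, ∀ m ∈ p.2.map Char.toNat, ¬(48 ≤ m ∧ m ≤ 57) := by decide

theorem charMap_inj : ∀ {u v : List Char}, u.map Char.toNat = v.map Char.toNat → u = v := by
  intro u v h
  exact List.map_injective_iff.mpr (fun a b hab => Char.ext (UInt32.toNat_inj.mp hab)) h

theorem F_inner : ∀ p ∈ wordsE, ∀ q ∈ wordsE, ∀ d, 1 ≤ d → d + q.2.length ≤ p.2.length →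
    (p.2.drop d).take q.2.length ≠ q.2 := by
  intro p hp q hq d h1 h2 he
  have hpl := F_len p hp; have hql := F_len q hq
  exact F_innerN p hp q hq d (by omega) h1 h2 (by rw [he])

theorem F_prefix : ∀ p ∈ wordsE, ∀ q ∈ wordsE, q.2.take p.2.length = p.2 → p = q := by
  intro p hp q hq he
  obtain ⟨h1, h2⟩ := F_prefixN p hp q hq (by rw [he])
  exact Prod.ext h1 (charMap_inj h2)

theorem F_digitfree : ∀ p ∈ wordsE, ∀ q ∈ wordsE, ∀ c ∈ PySem.Int.toChars q.1, c ∉ p.2 := by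
  intro p hp q hq c hc hcp
  exact F_dig2 p hp c.toNat (List.mem_map_of_mem hcp)
    (F_dig1 q hq c.toNat (List.mem_map_of_mem hc))

-- ===== generic list lemmas =====
theorem flatMap_congr' {α β : Type} {xs : List α} {f g : α → List β}
    (h : ∀ x ∈ xs, f x = g x) : xs.flatMap f = xs.flatMap g := by
  induction xs with
  | nil => rfl
  | cons a t ih =>
      simp only [List.flatMap_cons]
      rw [h a (by simp), ih (fun x hx => h x (by simp [hx]))]

theorem flatMap_eq_nil' {α β : Type} {xs : List α} {f : α → List β}
    (h : ∀ x ∈ xs, f x = []) : xs.flatMap f = [] := by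
  rw [flatMap_congr' h]; simp

theorem flatMap_single {α β : Type} [DecidableEq α] {xs : List α} {f : α → List β} {p₀ : α} {r : List β}
    (hnd : xs.Nodup) (hmem : p₀ ∈ xs) (h : ∀ x ∈ xs, f x = if x = p₀ then r else []) :
    xs.flatMap f = r := by
  induction xs with
  | nil => cases hmem
  | cons a t ih =>
      rcases List.mem_cons.mp hmem with rfl | hmem'
      · have : t.flatMap f = [] := flatMap_eq_nil' (fun x hx => by
          rw [h x (by simp [hx])]
          have : x ≠ p₀ := fun he => (List.nodup_cons.mp hnd).1 (he ▸ hx)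
          simp [this])
        simp [List.flatMap_cons, this, h p₀ (by simp)]
      · have ha : a ≠ p₀ := fun he => (List.nodup_cons.mp hnd).1 (he ▸ hmem')
        simp [List.flatMap_cons, h a (by simp), ha,
          ih (List.nodup_cons.mp hnd).2 hmem' (fun x hx => h x (by simp [hx]))]

-- occurrence transfer: if w occurs at s and v at t inside w's span, v occurs inside w
theorem sub_occ {l w v : List Char} {s t : Nat}
    (hw : (l.drop s).take w.length = w) (hv : (l.drop t).take v.length = v)
    (hst : s ≤ t) (hend : t + v.length ≤ s + w.length) :
    (w.drop (t - s)).take v.length = v := by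
  have h1 : w.drop (t - s) = ((l.drop s).drop (t - s)).take (w.length - (t - s)) := by
    conv_lhs => rw [← hw]
    rw [List.drop_take]
  rw [h1, List.drop_drop, show s + (t - s) = t by omega, List.take_take,
    Nat.min_eq_left (by omega), hv]

-- an occurrence fits inside the list
theorem occ_le {l w : List Char} {s : Nat} (hw : (l.drop s).take w.length = w)
    (hpos : 1 ≤ w.length) : s + w.length ≤ l.length := by
  have hlen : min w.length (l.length - s) = w.length := by
    simpa using congrArg List.length hw
  omega

-- ===== structural lemmas about Egen =====
theorem Egen_nil {l : List Char} {slo lo : Nat} (h : l.length ≤ lo) : Egen l slo lo = [] := by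
  unfold Egen
  rw [Nat.sub_eq_zero_of_le h]; rfl

theorem Egen_cons {l : List Char} {slo lo : Nat} (h : lo < l.length) :
    Egen l slo lo = l.getD lo ' ' :: (gEmit l slo lo ++ Egen l slo (lo + 1)) := by
  unfold Egen
  rw [show l.length - lo = (l.length - (lo + 1)) + 1 by omega, List.range'_succ]
  simp

-- map of getD over a range' is a segment
theorem seg_map {l : List Char} {lo m : Nat} (h : lo + m ≤ l.length) :
    (List.range' lo m).map (fun i => l.getD i ' ') = (l.drop lo).take m := by
  induction m generalizing lo with
  | zero => simp
  | succ m ih =>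
      rw [List.range'_succ, List.map_cons, ih (by omega),
        List.drop_eq_getElem_cons (by omega : lo < l.length), List.take_succ_cons,
        List.getD_eq_getElem l ' ' (by omega : lo < l.length)]

theorem Egen_decomp {l : List Char} {slo lo m : Nat} (hlen : lo + m ≤ l.length)
    (hnil : ∀ i, lo ≤ i → i < lo + m → gEmit l slo i = []) :
    Egen l slo lo = (l.drop lo).take m ++ Egen l slo (lo + m) := by
  induction m generalizing lo with
  | zero => simp
  | succ m ih =>
      rw [Egen_cons (by omega : lo < l.length), hnil lo (by omega) (by omega), List.nil_append,
        ih (by omega) (fun i h1 h2 => hnil i (by omega) (by omega)),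
        List.drop_eq_getElem_cons (by omega : lo < l.length), List.take_succ_cons,
        List.getD_eq_getElem l ' ' (by omega : lo < l.length), show lo + 1 + m = lo + (m + 1) by omega]
      simp

-- characters of gEmit are digit characters of the enumeration
theorem mem_gEmit {l : List Char} {slo i : Nat} {c : Char} (h : c ∈ gEmit l slo i) :
    ∃ q ∈ wordsE, c ∈ PySem.Int.toChars q.1 := by
  unfold gEmit at h
  obtain ⟨p, hp, hc⟩ := List.mem_flatMap.mp h
  by_cases hcond : p.2.length ≤ i + 1 ∧ slo + p.2.length ≤ i + 1 ∧
      (l.drop (i + 1 - p.2.length)).take p.2.length = p.2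
  · exact ⟨p, hp, by rwa [if_pos hcond] at hc⟩
  · rw [if_neg hcond] at hc; cases hc

-- digit-free prefix of Egen is a segment of l
theorem pure_prefix {l : List Char} (w' : List Char)
    (hdf : ∀ c ∈ w', ∀ q ∈ wordsE, c ∉ PySem.Int.toChars q.1) :
    ∀ lo slo, (Egen l slo lo).take w'.length = w' → (l.drop lo).take w'.length = w' := by
  induction w' with
  | nil => simp
  | cons c w'' ih =>
      intro lo slo h
      by_cases hlo : l.length ≤ lo
      · rw [Egen_nil hlo] at h; simp at h
      push Not at hlo
      rw [Egen_cons hlo, List.length_cons, List.take_succ_cons] at h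
      obtain ⟨hc, hrest⟩ := List.cons.injEq .. ▸ h
      rw [List.drop_eq_getElem_cons hlo, List.length_cons, List.take_succ_cons,
        ← List.getD_eq_getElem l ' ' hlo, hc]
      cases w'' with
      | nil => simp
      | cons c' t =>
          cases hg : gEmit l slo lo with
          | nil =>
              rw [hg, List.nil_append] at hrest
              exact congrArg _ (ih (fun d hd => hdf d (by simp [hd])) (lo + 1) slo hrest)
          | cons d ds =>
              exfalso
              rw [hg, List.cons_append, List.length_cons, List.take_succ_cons] at hrest
              have hd : d ∈ gEmit l slo lo := by rw [hg]; simp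
              obtain ⟨q, hq, hdq⟩ := mem_gEmit hd
              have h1 := F_dig1 q hq d.toNat (List.mem_map_of_mem hdq)
              have hcd : d = c' := (List.cons.injEq .. ▸ hrest).1
              have h2 := hdf c' (by simp) q hq
              rw [← hcd] at h2
              exact h2 hdq

-- ===== per-position facts under a match =====
-- at most one word matches at a given start
theorem uniq_match {l : List Char} {k : Nat} {p q : Int × List Char}
    (hp : p ∈ wordsE) (hq : q ∈ wordsE)
    (hmp : (l.drop k).take p.2.length = p.2) (hmq : (l.drop k).take q.2.length = q.2) : p = q := by
  by_cases hle : p.2.length ≤ q.2.length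
  · apply F_prefix p hp q hq
    rw [← hmq, List.take_take, Nat.min_eq_left hle, hmp]
  · refine (F_prefix q hq p hp ?_).symm
    rw [← hmp, List.take_take, Nat.min_eq_left (by omega), hmq]

-- inside a match at k no word ends with start ≥ k+1
theorem inner_nil_high {l : List Char} {k : Nat} {p₀ : Int × List Char}
    (hp₀ : p₀ ∈ wordsE) (hm : (l.drop k).take p₀.2.length = p₀.2)
    {i : Nat} (_h1 : k + 1 ≤ i) (h2 : i + 1 ≤ k + p₀.2.length) : gEmit l (k + 1) i = [] := by
  apply flatMap_eq_nil'
  intro q hq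
  rw [if_neg]
  rintro ⟨hq1, hq2, hq3⟩
  have hocc := sub_occ hm hq3 (by omega : k ≤ i + 1 - q.2.length) (by omega)
  exact F_inner p₀ hp₀ q hq (i + 1 - q.2.length - k) (by omega) (by omega) hocc

-- inside a match at k no word ends strictly before its end with start ≥ k
theorem inner_nil_low {l : List Char} {k : Nat} {p₀ : Int × List Char}
    (hp₀ : p₀ ∈ wordsE) (hm : (l.drop k).take p₀.2.length = p₀.2)
    {i : Nat} (_h1 : k + 1 ≤ i) (h2 : i + 1 < k + p₀.2.length) : gEmit l k i = [] := by
  apply flatMap_eq_nil'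
  intro q hq
  rw [if_neg]
  rintro ⟨hq1, hq2, hq3⟩
  by_cases ht : i + 1 - q.2.length = k
  · rw [ht] at hq3
    have := uniq_match hq hp₀ hq3 hm
    subst this
    omega
  · have hocc := sub_occ hm hq3 (by omega : k ≤ i + 1 - q.2.length) (by omega)
    exact F_inner p₀ hp₀ q hq (i + 1 - q.2.length - k) (by omega) (by omega) hocc

-- nothing ends at the start position itself
theorem gEmit_self_nil {l : List Char} {k : Nat} : gEmit l k k = [] := by
  apply flatMap_eq_nil'
  intro q hq
  rw [if_neg]
  rintro ⟨hq1, hq2, hq3⟩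
  have := F_len q hq
  omega

-- at the end of the match at k exactly its own digit fires
theorem gEmit_end {l : List Char} {k : Nat} {p₀ : Int × List Char}
    (hp₀ : p₀ ∈ wordsE) (hm : (l.drop k).take p₀.2.length = p₀.2) :
    gEmit l k (k + p₀.2.length - 1) = PySem.Int.toChars p₀.1 := by
  have hlp := F_len p₀ hp₀
  apply flatMap_single F_nodup hp₀
  intro q hq
  by_cases hqp : q = p₀
  · subst hqp
    rw [if_pos ⟨by omega, by omega, by rw [show k + q.2.length - 1 + 1 - q.2.length = k by omega]; exact hm⟩, if_pos rfl]
  · rw [if_neg, if_neg hqp]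
    rintro ⟨hq1, hq2, hq3⟩
    by_cases ht : k + p₀.2.length - 1 + 1 - q.2.length = k
    · rw [ht] at hq3
      exact hqp (uniq_match hq hp₀ hq3 hm)
    · have hocc := sub_occ hm hq3 (by omega) (by omega)
      exact F_inner p₀ hp₀ q hq (k + p₀.2.length - 1 + 1 - q.2.length - k) (by omega) (by omega) hocc

-- past the end of the match the start bounds k and k+1 agree
theorem gEmit_shift_match {l : List Char} {k : Nat} {p₀ : Int × List Char}
    (hp₀ : p₀ ∈ wordsE) (hm : (l.drop k).take p₀.2.length = p₀.2)
    {i : Nat} (h : k + p₀.2.length ≤ i) : gEmit l k i = gEmit l (k + 1) i := by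
  apply flatMap_congr'
  intro q hq
  refine if_congr ⟨?_, ?_⟩ rfl rfl
  · rintro ⟨hq1, hq2, hq3⟩
    refine ⟨hq1, ?_, hq3⟩
    by_cases ht : i + 1 - q.2.length = k
    · rw [ht] at hq3
      have := uniq_match hq hp₀ hq3 hm
      subst this
      omega
    · omega
  · rintro ⟨hq1, hq2, hq3⟩
    exact ⟨hq1, by omega, hq3⟩

-- with no match at k the start bounds k and k+1 agree everywhere
theorem gEmit_shift_nomatch {l : List Char} {k : Nat}
    (hnm : ∀ p ∈ wordsE, (l.drop k).take p.2.length ≠ p.2)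
    {i : Nat} : gEmit l k i = gEmit l (k + 1) i := by
  apply flatMap_congr'
  intro q hq
  refine if_congr ⟨?_, ?_⟩ rfl rfl
  · rintro ⟨hq1, hq2, hq3⟩
    refine ⟨hq1, ?_, hq3⟩
    by_cases ht : i + 1 - q.2.length = k
    · rw [ht] at hq3
      exact absurd hq3 (hnm q hq)
    · omega
  · rintro ⟨hq1, hq2, hq3⟩
    exact ⟨hq1, by omega, hq3⟩

theorem flatMap_singleton_map {α β : Type} (xs : List α) (g : α → β) :
    xs.flatMap (fun x => [g x]) = xs.map g := by
  induction xs with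
  | nil => rfl
  | cons a t ih => simp [ih]

theorem Egen_congr {l : List Char} {slo slo' lo : Nat}
    (h : ∀ i, lo ≤ i → gEmit l slo i = gEmit l slo' i) : Egen l slo lo = Egen l slo' lo := by
  unfold Egen
  apply flatMap_congr'
  intro i hi
  rw [h i (List.mem_range'_1.mp hi).1]

-- ===== the state before processing start k =====
-- drop k of the invariant state
theorem state_drop {l : List Char} {k : Nat} (hk : k < l.length) :
    (l.take (k + 1) ++ Egen l (k + 1) (k + 1)).drop k = l.getD k ' ' :: Egen l (k + 1) (k + 1) := by
  rw [List.drop_append_of_le_length (by simp; omega), List.drop_take,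
    show k + 1 - k = 1 by omega, List.drop_eq_getElem_cons hk, List.take_succ_cons,
    List.take_zero, List.getD_eq_getElem l ' ' hk]
  rfl

-- the slice test on the state is exactly a match of l at k (forward)
theorem test_fwd {l : List Char} {k : Nat} (hk : k < l.length) {p : Int × List Char}
    (hp : p ∈ wordsE)
    (h : ((l.take (k + 1) ++ Egen l (k + 1) (k + 1)).drop k).take p.2.length = p.2) :
    (l.drop k).take p.2.length = p.2 := by
  rw [state_drop hk] at h
  obtain ⟨c, t, hp2⟩ : ∃ c t, p.2 = c :: t := by
    have := F_len p hp
    cases hp2 : p.2 with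
    | nil => rw [hp2] at this; simp at this
    | cons c t => exact ⟨c, t, rfl⟩
  rw [hp2] at h ⊢
  rw [List.length_cons, List.take_succ_cons] at h
  obtain ⟨hc, hrest⟩ := List.cons.injEq .. ▸ h
  have hdf : ∀ d ∈ t, ∀ q ∈ wordsE, d ∉ PySem.Int.toChars q.1 := by
    intro d hd q hq hdq
    exact F_digitfree p hp q hq d hdq (by rw [hp2]; simp [hd])
  have := pure_prefix t hdf (k + 1) (k + 1) hrest
  rw [List.drop_eq_getElem_cons hk, List.length_cons, List.take_succ_cons, this,
    ← List.getD_eq_getElem l ' ' hk, hc]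

theorem test_bwd {l : List Char} {k : Nat} (hk : k < l.length) {p : Int × List Char}
    (hp : p ∈ wordsE) (hm : (l.drop k).take p.2.length = p.2) :
    ((l.take (k + 1) ++ Egen l (k + 1) (k + 1)).drop k).take p.2.length = p.2 := by
  have hlp := F_len p hp
  have hfit : k + p.2.length ≤ l.length := occ_le hm (by omega)
  rw [state_drop hk]
  rw [Egen_decomp (show (k + 1) + (p.2.length - 1) ≤ l.length by omega)
    (fun i h1 h2 => inner_nil_high hp hm h1 (by omega))]
  rw [show p.2.length = (p.2.length - 1) + 1 by omega, List.take_succ_cons,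
    List.take_append_of_le_length (by simp; omega),
    List.take_take, show min (p.2.length - 1) (p.2.length - 1 + 1 - 1) = p.2.length - 1 from by omega]
  rw [List.drop_eq_getElem_cons hk, show p.2.length = (p.2.length - 1) + 1 from by omega,
    List.take_succ_cons, ← List.getD_eq_getElem l ' ' hk] at hm
  exact hm

-- ===== tryA scanning lemmas =====
theorem tryA_none (ws : List (Int × List Char)) (line : List Char) (i : Int)
    (h : ∀ p ∈ ws, PySem.List.slice line (some i) (some (i + (p.2.length : Int))) ≠ p.2) :
    tryA ws line i = line := by
  induction ws with
  | nil => rfl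
  | cons a t ih =>
      obtain ⟨n, nbr⟩ := a
      simp only [tryA, h (n, nbr) (by simp)]
      exact ih (fun p hp => h p (by simp [hp]))

theorem tryA_found (ws : List (Int × List Char)) (line : List Char) (i : Int)
    (p₀ : Int × List Char) (hmem : p₀ ∈ ws)
    (ht : PySem.List.slice line (some i) (some (i + (p₀.2.length : Int))) = p₀.2)
    (huniq : ∀ p ∈ ws, PySem.List.slice line (some i) (some (i + (p.2.length : Int))) = p.2 → p = p₀) :
    tryA ws line i =
      PySem.List.slice line none (some (i + (p₀.2.length : Int))) ++ PySem.Int.toChars p₀.1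
        ++ PySem.List.slice line (some (i + (p₀.2.length : Int))) none := by
  induction ws with
  | nil => cases hmem
  | cons a t ih =>
      obtain ⟨n, nbr⟩ := a
      by_cases hc : PySem.List.slice line (some i) (some (i + (nbr.length : Int))) = nbr
      · have : (n, nbr) = p₀ := huniq (n, nbr) (by simp) hc
        subst this
        simp [tryA, hc]
      · have hne : p₀ ≠ (n, nbr) := by intro he; subst he; exact hc ht
        simp only [tryA, if_neg hc]
        exact ih (List.mem_cons.mp hmem |>.resolve_left hne)
          (fun p hp hs => huniq p (by simp [hp]) hs)

-- ===== the downward step =====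
theorem stepA_eq {l : List Char} {k : Nat} (hk : k < l.length) :
    tryA wordsE (l.take (k + 1) ++ Egen l (k + 1) (k + 1)) (k : Int) =
      l.take k ++ Egen l k k := by
  have hslice : ∀ p : Int × List Char,
      PySem.List.slice (l.take (k + 1) ++ Egen l (k + 1) (k + 1)) (some (k : Int))
        (some ((k : Int) + (p.2.length : Int))) =
      ((l.take (k + 1) ++ Egen l (k + 1) (k + 1)).drop k).take p.2.length := by
    intro p
    exact PySem.List.slice_natCast_add ..
  by_cases hex : ∃ p ∈ wordsE, (l.drop k).take p.2.length = p.2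
  · obtain ⟨p₀, hp₀, hm⟩ := hex
    have hlp := F_len p₀ hp₀
    have hfit : k + p₀.2.length ≤ l.length := occ_le hm (by omega)
    rw [tryA_found wordsE _ (k : Int) p₀ hp₀
      (by rw [hslice p₀]; exact test_bwd hk hp₀ hm)
      (fun p hp hs => uniq_match hp hp₀ (test_fwd hk hp (by rw [hslice p] at hs; exact hs)) hm)]
    have hcast : (k : Int) + (p₀.2.length : Int) = ((k + p₀.2.length : Nat) : Int) := by push_cast; ring
    rw [hcast, PySem.List.slice_to_natCast, PySem.List.slice_from_natCast]
    -- decompose the state at the cut point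
    have hdec : Egen l (k + 1) (k + 1) =
        (l.drop (k + 1)).take (p₀.2.length - 1) ++ Egen l (k + 1) (k + p₀.2.length) := by
      have := Egen_decomp (l := l) (slo := k + 1) (lo := k + 1) (m := p₀.2.length - 1)
        (by omega) (fun i h1 h2 => inner_nil_high hp₀ hm h1 (by omega))
      rwa [show k + 1 + (p₀.2.length - 1) = k + p₀.2.length from by omega] at this
    have hstate : l.take (k + 1) ++ Egen l (k + 1) (k + 1) =
        l.take (k + p₀.2.length) ++ Egen l (k + 1) (k + p₀.2.length) := by
      rw [hdec, ← List.append_assoc, ← List.take_add,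
        show k + 1 + (p₀.2.length - 1) = k + p₀.2.length from by omega]
    rw [hstate]
    have htk : (l.take (k + p₀.2.length) ++ Egen l (k + 1) (k + p₀.2.length)).take (k + p₀.2.length)
        = l.take (k + p₀.2.length) := by
      rw [List.take_append_of_le_length (by simp; omega), List.take_take, Nat.min_self]
    have hdr : (l.take (k + p₀.2.length) ++ Egen l (k + 1) (k + p₀.2.length)).drop (k + p₀.2.length)
        = Egen l (k + 1) (k + p₀.2.length) := by
      rw [List.drop_append_of_le_length (by simp; omega), List.drop_take, Nat.sub_self]
      simp
    rw [htk, hdr]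
    -- expand the right-hand side
    have hEk : Egen l k k =
        ((l.drop k).take (p₀.2.length - 1) ++ (l.getD (k + p₀.2.length - 1) ' ' :: PySem.Int.toChars p₀.1))
          ++ Egen l (k + 1) (k + p₀.2.length) := by
      unfold Egen
      rw [show l.length - k = ((p₀.2.length - 1) + 1) + (l.length - (k + p₀.2.length)) from by omega,
        ← List.range'_append, ← List.range'_append, List.flatMap_append, List.flatMap_append]
      simp only [one_mul]
      congr 1
      · congr 1
        · have h1 : (List.range' k (p₀.2.length - 1)).flatMap (fun i => l.getD i ' ' :: gEmit l k i)
              = (List.range' k (p₀.2.length - 1)).flatMap (fun i => [l.getD i ' ']) := by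
            apply flatMap_congr'
            intro i hi
            have hi' := List.mem_range'_1.mp hi
            rcases Nat.eq_or_lt_of_le hi'.1 with he | hlt
            · rw [← he, gEmit_self_nil]
            · rw [inner_nil_low hp₀ hm hlt (by omega)]
          rw [h1, flatMap_singleton_map, seg_map (by omega)]
        · rw [show k + (p₀.2.length - 1) = k + p₀.2.length - 1 from by omega]
          simp only [List.range'_one, List.flatMap_cons, List.flatMap_nil, List.append_nil]
          rw [gEmit_end hp₀ hm]
      · rw [show k + (p₀.2.length - 1 + 1) = k + p₀.2.length from by omega]
        have : (List.range' (k + p₀.2.length) (l.length - (k + p₀.2.length))).flatMap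
            (fun i => l.getD i ' ' :: gEmit l k i) = Egen l k (k + p₀.2.length) := rfl
        rw [this]
        exact Egen_congr (fun i hi => gEmit_shift_match hp₀ hm hi)
    rw [hEk]
    -- both sides are the same segments re-associated
    have htk2 : l.take (k + p₀.2.length) =
        l.take k ++ (l.drop k).take (p₀.2.length - 1) ++ [l.getD (k + p₀.2.length - 1) ' '] := by
      rw [show k + p₀.2.length = (k + (p₀.2.length - 1)) + 1 from by omega, List.take_add_one,
        List.take_add, List.getElem?_eq_getElem (by omega : k + (p₀.2.length - 1) < l.length)]
      simp [List.getElem?_eq_getElem (show k + (p₀.2.length - 1) < l.length from by omega)]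
    rw [htk2]
    simp [List.append_assoc]
  · push Not at hex
    rw [tryA_none _ _ _
      (fun p hp hs => hex p hp (test_fwd hk hp (by rw [hslice p] at hs; exact hs)))]
    rw [Egen_cons hk, gEmit_self_nil, List.nil_append,
      Egen_congr (fun i _ => gEmit_shift_nomatch hex)]
    rw [List.take_add_one, List.getElem?_eq_getElem hk]
    simp only [Option.toList_some, List.append_assoc, List.singleton_append]
    rw [List.getD_eq_getElem l ' ' hk]

-- ===== the descending loop of A =====
def downL : Nat → List Int
  | 0 => []
  | k + 1 => (k : Int) :: downL k

theorem pyRange_down (n : Nat) :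
    PySem.List.pyRange ((n : Int) - 1) (-1) (-1) = downL n := by
  induction n with
  | zero =>
      rw [show ((0 : Nat) : Int) - 1 = -1 from by norm_num,
        PySem.List.pyRange_neg_one_eq_nil le_rfl]
      rfl
  | succ n ih =>
      rw [show ((n + 1 : Nat) : Int) - 1 = (n : Int) from by push_cast; ring,
        PySem.List.pyRange_neg_one_cons (by omega : (-1 : Int) < (n : Int)), ih]
      rfl

theorem foldA_inv {l : List Char} :
    ∀ m, m ≤ l.length →
      (downL m).foldl (fun line i => tryA wordsE line i) (l.take m ++ Egen l m m) =
        l.take 0 ++ Egen l 0 0 := by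
  intro m
  induction m with
  | zero => intro _; rfl
  | succ m ih =>
      intro h
      show (downL m).foldl (fun line i => tryA wordsE line i)
        (tryA wordsE (l.take (m + 1) ++ Egen l (m + 1) (m + 1)) (m : Int)) = l.take 0 ++ Egen l 0 0
      rw [stepA_eq (by omega : m < l.length)]
      exact ih (by omega)

theorem lineA_eq_Egen (item : List Char) : lineA item = Egen item 0 0 := by
  unfold lineA
  rw [pyRange_down]
  show (downL item.length).foldl (fun line i => tryA wordsE line i) item = Egen item 0 0
  have key := foldA_inv (l := item) item.length le_rfl
  rw [List.take_length, Egen_nil le_rfl, List.append_nil] at key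
  rw [key]
  simp

theorem foldl_if_append {α : Type} (ws : List α) (C : α → Prop) [DecidablePred C]
    (g : α → List Char) (acc : List Char) :
    ws.foldl (fun out p => if C p then out ++ g p else out) acc
      = acc ++ ws.flatMap (fun p => if C p then g p else []) := by
  induction ws generalizing acc with
  | nil => simp
  | cons a t ih =>
      by_cases h : C a
      · simp [h, ih, List.append_assoc]
      · simp [h, ih]

theorem foldl_append_flat {α : Type} (xs : List α) (g : α → List Char) (acc : List Char) :
    xs.foldl (fun out i => out ++ g i) acc = acc ++ xs.flatMap g := by
  induction xs generalizing acc with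
  | nil => simp
  | cons a t ih => simp [ih, List.append_assoc]

theorem foldl_funcongr {α β : Type} (xs : List α) (f g : β → α → β) (acc : β)
    (h : ∀ b a, f b a = g b a) : xs.foldl f acc = xs.foldl g acc := by
  induction xs generalizing acc with
  | nil => rfl
  | cons a t ih => simp only [List.foldl_cons, h, ih]

theorem lineB_eq_Egen (item : List Char) : lineB item = Egen item 0 0 := by
  unfold lineB
  rw [foldl_funcongr _ _
    (fun out i => out ++ ((PySem.List.pyGet? item i).toList ++ wordsE.flatMap (fun p =>
      if (i - (p.2.length : Int) + 1 ≥ 0 ∧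
          PySem.List.slice item (some (i - (p.2.length : Int) + 1)) (some (i + 1)) = p.2)
      then PySem.Int.toChars p.1 else []))) []
    (fun out i => by
      rw [foldl_if_append (PySem.List.enumerate numbersB 0)
        (fun p => i - (p.2.length : Int) + 1 ≥ 0 ∧
          PySem.List.slice item (some (i - (p.2.length : Int) + 1)) (some (i + 1)) = p.2)
        (fun p => PySem.Int.toChars p.1) (out ++ (PySem.List.pyGet? item i).toList),
        List.append_assoc]
      rfl)]
  rw [foldl_append_flat, List.nil_append]
  rw [PySem.List.pyRange_one, show ((item.length : Int) - 0).toNat = item.length from by omega]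
  rw [List.flatMap_map]
  unfold Egen
  rw [Nat.sub_zero, ← List.range_eq_range']
  apply flatMap_congr'
  intro k hk
  have hkn : k < item.length := List.mem_range.mp hk
  have hget : (PySem.List.pyGet? item ((0 : Int) + (k : Nat))).toList = [item.getD k ' '] := by
    rw [show ((0 : Int) + (k : Nat)) = ((k : Nat) : Int) from by omega, PySem.List.pyGet?_natCast,
      List.getElem?_eq_getElem hkn, List.getD_eq_getElem item ' ' hkn]
    rfl
  rw [hget]
  show _ ++ _ = [item.getD k ' '] ++ gEmit item 0 k
  congr 1
  apply flatMap_congr'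
  intro p hp
  refine if_congr ⟨?_, ?_⟩ rfl rfl
  · rintro ⟨h1, h2⟩
    have hlen : p.2.length ≤ k + 1 := by omega
    rw [show (0 : Int) + (k : Nat) - (p.2.length : Int) + 1 = ((k + 1 - p.2.length : Nat) : Int) from by omega,
      show (0 : Int) + (k : Nat) + 1 = ((k + 1 : Nat) : Int) from by omega,
      PySem.List.slice_natCast, show k + 1 - (k + 1 - p.2.length) = p.2.length from by omega] at h2
    exact ⟨hlen, by omega, h2⟩
  · rintro ⟨h1, h2, h3⟩
    refine ⟨by omega, ?_⟩
    rw [show (0 : Int) + (k : Nat) - (p.2.length : Int) + 1 = ((k + 1 - p.2.length : Nat) : Int) from by omega,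
      show (0 : Int) + (k : Nat) + 1 = ((k + 1 : Nat) : Int) from by omega,
      PySem.List.slice_natCast, show k + 1 - (k + 1 - p.2.length) = p.2.length from by omega]
    exact h3

theorem lineA_eq_lineB (item : List Char) : lineA item = lineB item := by
  rw [lineA_eq_Egen, lineB_eq_Egen]

-- ===== VERDICT (by name: the statement is the Claim_ definition above) =====
theorem insert_numbers_spec : Claim_equal_insert_numbers := by
  intro document _
  unfold Spec_insert_numbers insert_numbers insert_numbers_alt
  induction document using List.reverseRecOn with
  | nil => rfl
  | append_singleton xs x ih =>
      simp only [List.foldl_append, List.foldl_cons, List.foldl_nil, lineA_eq_lineB]
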